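-- pv_equiv track=rewrite | github.com/rewsclawbot/twitch-to-shorts | src/youtube_uploader.py | _limit_tag_length
-- ===== SOURCE A (Python) =====
-- def _limit_tag_length(tags: list[str], max_total_len: int = 500) -> list[str]:
--     total = 0
--     limited: list[str] = []
--     for tag in tags:
--         tag_len = len(tag)
--         if limited:
--             tag_len += 1  # comma separator
--         if total + tag_len > max_total_len:
--             break
--         limited.append(tag)
--         total += tag_len
--     return limited
-- ===== SOURCE B (Python) =====
-- def _limit_tag_length(tags: list[str], max_total_len: int = 500) -> list[str]:
--     # Binary search for the largest prefix whose comma-joined length fits the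
--     # budget; valid because the joined length is nondecreasing in the prefix size.
--     lo, hi = 0, len(tags)
--     while lo < hi:
--         mid = (lo + hi + 1) // 2
--         if len(",".join(tags[:mid])) <= max_total_len:
--             lo = mid
--         else:
--             hi = mid - 1
--     return tags[:lo]
-- ===== Notes on version B (the rewrite author's own statement) =====
-- stated objective: alternative
-- what changed: Replaced the greedy left-to-right accumulation with break by a binary search over the prefix length, testing each candidate prefix by the length of its comma-joined string (monotone in prefix size).
import Mathlib
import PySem

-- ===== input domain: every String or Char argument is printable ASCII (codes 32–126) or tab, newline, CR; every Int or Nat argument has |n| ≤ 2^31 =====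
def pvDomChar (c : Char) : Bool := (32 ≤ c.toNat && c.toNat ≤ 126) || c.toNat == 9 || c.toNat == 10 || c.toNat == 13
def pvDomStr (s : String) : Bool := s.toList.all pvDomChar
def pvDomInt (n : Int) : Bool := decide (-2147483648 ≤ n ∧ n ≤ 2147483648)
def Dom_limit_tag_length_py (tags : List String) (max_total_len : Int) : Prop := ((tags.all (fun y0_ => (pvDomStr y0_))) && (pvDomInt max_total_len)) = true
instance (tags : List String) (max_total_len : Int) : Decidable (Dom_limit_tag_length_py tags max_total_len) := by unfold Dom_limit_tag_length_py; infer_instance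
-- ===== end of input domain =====

-- B replaces A's greedy accumulation-with-break by a binary search on the prefix
-- length (checking candidates via the comma-joined string's length); alternative
-- algorithm of similar cost, proved to return the same list.

-- ===== PORT A =====
-- the 'for tag in tags' loop with running total, growing result list and break
def pvLoopA (max_total_len : Int) : List String → Int → List String → List String
  | [], _, limited => limited
  | tag :: rest, total, limited =>
    let tag_len : Int := PySem.Str.len tag + (if limited = [] then 0 else 1)
    if total + tag_len > max_total_len then limited
    else pvLoopA max_total_len rest (total + tag_len) (limited ++ [tag])

def limit_tag_length_py (tags : List String) (max_total_len : Int) : List String :=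
  pvLoopA max_total_len tags 0 []

-- ===== PORT B =====
-- the 'while lo < hi' binary-search loop of Source B (fuel = tags.length bounds the iterations: hi - lo shrinks each step);
-- Python's (lo+hi+1)//2 on nonnegative ints is exactly Nat division here
def pvBS (tags : List String) (max_total_len : Int) : Nat → Nat → Nat → Nat
  | 0, lo, _ => lo
  | fuel + 1, lo, hi =>
    if lo < hi then
      let mid := (lo + hi + 1) / 2
      if PySem.Str.len (PySem.Str.join "," (tags.take mid)) ≤ max_total_len
      then pvBS tags max_total_len fuel mid hi
      else pvBS tags max_total_len fuel lo (mid - 1)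
    else lo

def limit_tag_length_py_alt (tags : List String) (max_total_len : Int) : List String :=
  tags.take (pvBS tags max_total_len tags.length 0 tags.length)

-- ===== PRECONDITION & SPEC =====
def Spec_limit_tag_length_py (tags : List String) (max_total_len : Int) (out : List String) : Prop := out = limit_tag_length_py_alt tags max_total_len
instance (tags : List String) (max_total_len : Int) (out : List String) : Decidable (Spec_limit_tag_length_py tags max_total_len out) := by unfold Spec_limit_tag_length_py; infer_instance

-- ===== CLAIM (what is proved, stated in full; the proofs are below) =====
def Claim_equal_limit_tag_length_py : Prop := ∀ (tags : List String) (max_total_len : Int), Dom_limit_tag_length_py tags max_total_len → Spec_limit_tag_length_py tags max_total_len (limit_tag_length_py tags max_total_len)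

-- ===== LEMMAS AND PROOFS =====

-- length (in chars) of the comma-join of the first k tags
def pvF (tags : List String) (k : Nat) : Nat :=
  (PySem.Chars.join [','] ((tags.take k).map String.toList)).length

-- "the first k tags fit the budget"
def pvP (tags : List String) (max_total_len : Int) (k : Nat) : Prop :=
  (pvF tags k : Int) ≤ max_total_len

lemma pv_joinlen_append (l : List (List Char)) (x : List Char) :
    (PySem.Chars.join [','] (l ++ [x])).length
      = (PySem.Chars.join [','] l).length + x.length + (if l = [] then 0 else 1) := by
  induction l with
  | nil => simp [PySem.Chars.join_nil, PySem.Chars.join_singleton]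
  | cons c rest ih =>
    cases rest with
    | nil =>
      simp only [List.nil_append, List.cons_append, PySem.Chars.join_cons_cons,
        PySem.Chars.join_singleton]
      simp
      omega
    | cons d rest' =>
      simp only [List.cons_append] at ih ⊢
      rw [PySem.Chars.join_cons_cons, PySem.Chars.join_cons_cons, List.length_append,
        List.length_append, List.length_append, List.length_append, ih]
      simp
      omega

lemma pvF_succ (tags : List String) (k : Nat) (hk : k < tags.length) :
    pvF tags (k + 1)
      = pvF tags k + tags[k].toList.length + (if k = 0 then 0 else 1) := by
  have hne : tags ≠ [] := by intro h; subst h; simp at hk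
  unfold pvF
  rw [List.take_add_one, List.getElem?_eq_getElem hk]
  simp only [Option.toList_some, List.map_append, List.map_cons, List.map_nil]
  rw [pv_joinlen_append]
  by_cases h0 : k = 0
  · subst h0; simp
  · have hiff : List.map String.toList (List.take k tags) ≠ [] := by
      simp [List.take_eq_nil_iff, hne, h0]
    rw [if_neg hiff, if_neg h0]

lemma pvF_le_succ (tags : List String) (k : Nat) : pvF tags k ≤ pvF tags (k + 1) := by
  by_cases hk : k < tags.length
  · rw [pvF_succ tags k hk]; omega
  · unfold pvF
    rw [List.take_of_length_le (by omega), List.take_of_length_le (by omega)]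

lemma pvF_mono (tags : List String) {j k : Nat} (h : j ≤ k) : pvF tags j ≤ pvF tags k := by
  induction k with
  | zero => simp_all
  | succ m ih =>
    rcases Nat.lt_or_ge j (m + 1) with h' | h'
    · exact le_trans (ih (by omega)) (pvF_le_succ tags m)
    · have : j = m + 1 := by omega
      simp [this]

lemma pvP_anti (tags : List String) (max_total_len : Int) {j k : Nat} (h : j ≤ k)
    (hP : pvP tags max_total_len k) : pvP tags max_total_len j := by
  unfold pvP at *
  have := pvF_mono tags h
  omega

-- the characterization both programs satisfy is unique
lemma pv_unique (tags : List String) (max_total_len : Int) (r r' : Nat)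
    (hr : r ≤ tags.length ∧ (r = 0 ∨ pvP tags max_total_len r) ∧
          (r < tags.length → ¬ pvP tags max_total_len (r + 1)))
    (hr' : r' ≤ tags.length ∧ (r' = 0 ∨ pvP tags max_total_len r') ∧
           (r' < tags.length → ¬ pvP tags max_total_len (r' + 1))) : r = r' := by
  by_contra hne
  rcases Nat.lt_or_ge r r' with h | h
  · have hPr' : pvP tags max_total_len r' := by
      rcases hr'.2.1 with h0 | h1
      · omega
      · exact h1
    exact hr.2.2 (by omega) (pvP_anti tags max_total_len (by omega) hPr')
  · have h' : r' < r := by omega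
    have hPr : pvP tags max_total_len r := by
      rcases hr.2.1 with h0 | h1
      · omega
      · exact h1
    exact hr'.2.2 (by omega) (pvP_anti tags max_total_len (by omega) hPr)

-- the boolean test in Source B's loop is exactly pvP
lemma pv_test_iff (tags : List String) (max_total_len : Int) (k : Nat) :
    (PySem.Str.len (PySem.Str.join "," (tags.take k)) ≤ max_total_len)
      ↔ pvP tags max_total_len k := by
  unfold pvP pvF
  rw [PySem.Str.len_eq, PySem.Str.toList_join]
  have : (",").toList = [','] := by decide
  rw [this]

-- A's loop, started after k accepted tags, returns a prefix with the characterization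
lemma pvLoopA_char (tags : List String) (max_total_len : Int) :
    ∀ fuel k, tags.length - k ≤ fuel → k ≤ tags.length → (k = 0 ∨ pvP tags max_total_len k) →
    ∃ r, pvLoopA max_total_len (tags.drop k) (pvF tags k) (tags.take k) = tags.take r ∧
         r ≤ tags.length ∧ (r = 0 ∨ pvP tags max_total_len r) ∧
         (r < tags.length → ¬ pvP tags max_total_len (r + 1)) := by
  intro fuel
  induction fuel with
  | zero =>
    intro k hfuel hk hPk
    have hkn : k = tags.length := by omega
    refine ⟨k, ?_, hk, hPk, by omega⟩
    subst hkn
    simp [pvLoopA]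
  | succ f ih =>
    intro k hfuel hk hPk
    by_cases hklt : k < tags.length
    · have hdrop : tags.drop k = tags[k] :: tags.drop (k + 1) :=
        List.drop_eq_getElem_cons hklt
      have hne : tags ≠ [] := by intro h; subst h; simp at hklt
      have htake : tags.take k = [] ↔ k = 0 := by
        simp [List.take_eq_nil_iff, hne]
      have hstep : (pvF tags k : Int) +
          (PySem.Str.len tags[k] + (if tags.take k = [] then (0:Int) else 1))
          = (pvF tags (k + 1) : Int) := by
        rw [pvF_succ tags k hklt, PySem.Str.len_eq]
        by_cases h0 : k = 0
        · rw [if_pos (htake.mpr h0), if_pos h0]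
          push_cast; ring
        · rw [if_neg (fun h => h0 (htake.mp h)), if_neg h0]
          push_cast; ring
      rw [hdrop]
      simp only [pvLoopA]
      rw [hstep]
      by_cases hfit : (pvF tags (k + 1) : Int) > max_total_len
      · rw [if_pos hfit]
        exact ⟨k, rfl, by omega, hPk, fun _ => by unfold pvP; omega⟩
      · rw [if_neg hfit]
        have hPk1 : pvP tags max_total_len (k + 1) := by unfold pvP; omega
        have htake1 : tags.take k ++ [tags[k]] = tags.take (k + 1) := by
          rw [List.take_add_one, List.getElem?_eq_getElem hklt]
          simp
        rw [htake1]
        exact ih (k + 1) (by omega) (by omega) (Or.inr hPk1)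
    · have hkn : k = tags.length := by omega
      refine ⟨k, ?_, hk, hPk, by omega⟩
      subst hkn
      simp [pvLoopA]

-- B's binary search maintains: everything ≤ lo fits (or is 0), everything > hi fails
lemma pvBS_char (tags : List String) (max_total_len : Int) :
    ∀ fuel lo hi, hi - lo ≤ fuel → lo ≤ hi → hi ≤ tags.length →
    (lo = 0 ∨ pvP tags max_total_len lo) →
    (∀ m, hi < m → m ≤ tags.length → ¬ pvP tags max_total_len m) →
    (pvBS tags max_total_len fuel lo hi ≤ tags.length ∧
     (pvBS tags max_total_len fuel lo hi = 0 ∨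
        pvP tags max_total_len (pvBS tags max_total_len fuel lo hi)) ∧
     (pvBS tags max_total_len fuel lo hi < tags.length →
        ¬ pvP tags max_total_len (pvBS tags max_total_len fuel lo hi + 1))) := by
  intro fuel
  induction fuel with
  | zero =>
    intro lo hi hfuel hle hhi hlo hfail
    have : lo = hi := by omega
    subst this
    show (pvBS tags max_total_len 0 lo lo ≤ tags.length ∧ _)
    rw [pvBS]
    exact ⟨by omega, hlo, fun h => hfail (lo + 1) (by omega) (by omega)⟩
  | succ f ih =>
    intro lo hi hfuel hle hhi hlo hfail
    show (pvBS tags max_total_len (f + 1) lo hi ≤ tags.length ∧ _)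
    rw [pvBS]
    by_cases h : lo < hi
    · rw [if_pos h]
      set mid := (lo + hi + 1) / 2 with hmid
      have hmid1 : lo + 1 ≤ mid := by omega
      have hmid2 : mid ≤ hi := by omega
      by_cases hfit : PySem.Str.len (PySem.Str.join "," (tags.take mid)) ≤ max_total_len
      · rw [if_pos hfit]
        have hP : pvP tags max_total_len mid := (pv_test_iff tags max_total_len mid).mp hfit
        exact ih mid hi (by omega) (by omega) hhi (Or.inr hP) hfail
      · rw [if_neg hfit]
        have hnP : ¬ pvP tags max_total_len mid :=
          fun h' => hfit ((pv_test_iff tags max_total_len mid).mpr h')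
        refine ih lo (mid - 1) (by omega) (by omega) (by omega) hlo ?_
        intro m hm hmn hPm
        rcases Nat.lt_or_ge m mid with h' | h'
        · exact hfail m (by omega) hmn hPm
        · exact hnP (pvP_anti tags max_total_len h' hPm)
    · rw [if_neg h]
      have : lo = hi := by omega
      subst this
      exact ⟨by omega, hlo, fun hlt => hfail (lo + 1) (by omega) (by omega)⟩

-- ===== VERDICT (by name: the statement is the Claim_ definition above) =====
theorem limit_tag_length_py_spec : Claim_equal_limit_tag_length_py := by
  intro tags max_total_len _
  unfold Spec_limit_tag_length_py limit_tag_length_py limit_tag_length_py_alt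
  have h0 : pvF tags 0 = 0 := by simp [pvF, PySem.Chars.join_nil]
  obtain ⟨r, hr_eq, hr⟩ :=
    pvLoopA_char tags max_total_len tags.length 0 (by omega) (by omega) (Or.inl rfl)
  have hA : pvLoopA max_total_len tags 0 [] = tags.take r := by
    have := hr_eq
    rw [h0] at this
    simpa using this
  have hB := pvBS_char tags max_total_len tags.length 0 tags.length (by omega)
    (by omega) le_rfl (Or.inl rfl) (by intro m hm hmn; omega)
  have : r = pvBS tags max_total_len tags.length 0 tags.length :=
    pv_unique tags max_total_len r _ hr hB
  rw [hA, this]
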